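-- pv_equiv track=rewrite | github.com/Victor723/CS-1134 | HW2/kz1005_hw2_q5.py | split_parity2
-- ===== SOURCE A (Python) =====
-- def split_parity2(lst):
--     n=len(lst)
--     for i in range(n):
--         if lst[i]%2==0:
--             lst.append(lst[i])
--     for i in range(n):
--         if lst[i]%2!=0:
--             lst.append(lst[i])
--     for i in range(n):
--         lst[i]=lst.pop()
--     return lst
-- ===== SOURCE B (Python) =====
-- def split_parity2(lst):
--     odds = [x for x in lst if x % 2 != 0]
--     evens = [x for x in lst if x % 2 == 0]
--     lst[:] = odds[::-1] + evens[::-1]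
--     return lst
-- ===== Notes on version B (the rewrite author's own statement) =====
-- stated objective: simpler
-- what changed: Replaces A's three index loops (grow the list to 2n by appending evens then odds, then overwrite the first n slots by popping the tail) with a direct partition into odds/evens and a slice-reversed concatenation assigned in place.
import Mathlib
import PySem

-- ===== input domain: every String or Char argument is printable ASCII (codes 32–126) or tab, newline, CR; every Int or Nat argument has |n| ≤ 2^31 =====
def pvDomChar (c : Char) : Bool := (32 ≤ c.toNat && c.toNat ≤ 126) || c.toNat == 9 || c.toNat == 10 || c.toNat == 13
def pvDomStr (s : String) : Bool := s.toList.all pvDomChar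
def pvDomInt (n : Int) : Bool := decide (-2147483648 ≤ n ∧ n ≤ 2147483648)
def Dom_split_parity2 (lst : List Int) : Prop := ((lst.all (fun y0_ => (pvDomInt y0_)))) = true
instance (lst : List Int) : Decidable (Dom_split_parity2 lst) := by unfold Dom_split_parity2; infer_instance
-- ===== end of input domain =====

-- B replaces A's append-evens/append-odds/pop-back loops by a partition into odds and
-- evens and a reversed concatenation, assigned in place (B performs the same in-place
-- mutation via lst[:] = ..., so side effects match; objective: simpler).

-- ===== PORT A =====
-- loop body of A's two append loops: 'if lst[i] % 2 ==/!= 0: lst.append(lst[i])'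
def pvStepApp (p : Int → Bool) (acc : List Int) (i : Nat) : List Int :=
  match PySem.List.pyGet? acc (i : Int) with
  | some v => if p v then acc ++ [v] else acc
  | none => acc        -- unreachable: i < original length ≤ len(acc)

-- loop body of A's third loop: 'lst[i] = lst.pop()'
def pvStepPop (acc : List Int) (i : Nat) : List Int :=
  match PySem.List.pop? acc with
  | some r => r.2.set i r.1
  | none => acc        -- unreachable: the list is never empty there

def split_parity2 (lst : List Int) : List Int :=
  let n := lst.length
  let l1 := (List.range n).foldl (pvStepApp (fun v => PySem.Int.mod v 2 == 0)) lst
  let l2 := (List.range n).foldl (pvStepApp (fun v => PySem.Int.mod v 2 != 0)) l1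
  (List.range n).foldl pvStepPop l2

-- ===== PORT B =====
def split_parity2_alt (lst : List Int) : List Int :=
  (lst.filter (fun x => PySem.Int.mod x 2 != 0)).reverse
    ++ (lst.filter (fun x => PySem.Int.mod x 2 == 0)).reverse

-- ===== PRECONDITION & SPEC =====
def Spec_split_parity2 (lst : List Int) (out : List Int) : Prop := out = split_parity2_alt lst
instance (lst : List Int) (out : List Int) : Decidable (Spec_split_parity2 lst out) := by unfold Spec_split_parity2; infer_instance

-- ===== CLAIM (what is proved, stated in full; the proofs are below) =====
def Claim_equal_split_parity2 : Prop := ∀ (lst : List Int), Dom_split_parity2 lst → Spec_split_parity2 lst (split_parity2 lst)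

-- ===== LEMMAS AND PROOFS =====

-- A's first two loops: starting from pre ++ s and scanning indices 0..k-1 of pre,
-- the elements of pre satisfying p are appended in order.
theorem pv_loop_app (p : Int → Bool) (pre s : List Int) (k : Nat) (hk : k ≤ pre.length) :
    (List.range k).foldl (pvStepApp p) (pre ++ s)
      = pre ++ s ++ (pre.take k).filter p := by
  induction k with
  | zero => simp
  | succ k ih =>
    have hk' : k < pre.length := by omega
    rw [List.range_succ, List.foldl_append, ih (by omega)]
    have hget : PySem.List.pyGet? (pre ++ s ++ (pre.take k).filter p) (k : Int)
        = some pre[k] := by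
      rw [PySem.List.pyGet?_natCast]
      rw [List.append_assoc, List.getElem?_append_left hk', List.getElem?_eq_getElem hk']
    simp only [List.foldl_cons, List.foldl_nil, pvStepApp, hget]
    have ht : pre.take (k + 1) = pre.take k ++ [pre[k]] := by
      rw [List.take_add_one, List.getElem?_eq_getElem hk']; rfl
    rw [ht, List.filter_append]
    by_cases hp : p pre[k]
    · simp [hp]
    · simp [hp]

-- A's third loop: popping the n-element tail T back into the first slots reverses T.
theorem pv_loop_pop (pre T : List Int) (hlen : T.length = pre.length) (k : Nat)
    (hk : k ≤ pre.length) :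
    (List.range k).foldl pvStepPop (pre ++ T)
      = T.reverse.take k ++ (pre.drop k ++ T.take (pre.length - k)) := by
  induction k with
  | zero => simp [List.take_of_length_le (le_of_eq hlen)]
  | succ k ih =>
    have hk' : k < pre.length := by omega
    have hT : k < T.length := by omega
    have hidx : pre.length - 1 - k < T.length := by omega
    rw [List.range_succ, List.foldl_append, ih (by omega)]
    -- split off the last element of the remaining tail T.take (n-k)
    have htake : T.take (pre.length - k)
        = T.take (pre.length - k - 1) ++ [T[pre.length - k - 1]] := by
      have h1 : pre.length - k = (pre.length - k - 1) + 1 := by omega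
      conv_lhs => rw [h1]
      rw [List.take_add_one, List.getElem?_eq_getElem (by omega)]
      rfl
    have hstate : T.reverse.take k ++ (pre.drop k ++ T.take (pre.length - k))
        = (T.reverse.take k ++ (pre.drop k ++ T.take (pre.length - k - 1)))
            ++ [T[pre.length - k - 1]] := by
      rw [htake]; simp
    simp only [List.foldl_cons, List.foldl_nil, pvStepPop, hstate,
      PySem.List.pop?_last]
    have hlen_take : (T.reverse.take k).length = k := by
      rw [List.length_take, List.length_reverse]; omega
    rw [List.set_append_right _ _ (le_of_eq hlen_take), hlen_take]
    have hdrop : pre.drop k = pre[k] :: pre.drop (k + 1) :=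
      List.drop_eq_getElem_cons hk'
    rw [hdrop]
    simp only [Nat.sub_self, List.cons_append, List.set_cons_zero]
    have hrev : T.reverse.take (k + 1) = T.reverse.take k ++ [T[pre.length - k - 1]] := by
      rw [List.take_add_one, List.getElem?_eq_getElem (by simpa using hT)]
      simp only [Option.toList_some, List.getElem_reverse]
      have e : T.length - 1 - k = pre.length - k - 1 := by omega
      simp [e]
    rw [hrev]
    have h2 : pre.length - (k + 1) = pre.length - k - 1 := by omega
    simp [h2, List.append_assoc]

-- the two filters partition the list, so the appended tail has length n
theorem pv_filter_len (p : Int → Bool) (l : List Int) :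
    (l.filter p).length + (l.filter (fun x => !p x)).length = l.length := by
  induction l with
  | nil => simp
  | cons x xs ih =>
    by_cases hp : p x <;> simp [hp] <;> omega

-- ===== VERDICT (by name: the statement is the Claim_ definition above) =====
theorem split_parity2_spec : Claim_equal_split_parity2 := by
  intro lst _
  unfold Spec_split_parity2 split_parity2 split_parity2_alt
  simp only []
  set pE : Int → Bool := fun v => PySem.Int.mod v 2 == 0 with hpE
  set pO : Int → Bool := fun v => PySem.Int.mod v 2 != 0 with hpO
  have h1 : (List.range lst.length).foldl (pvStepApp pE) lst
      = lst ++ (lst.filter pE) := by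
    have := pv_loop_app pE lst [] lst.length (le_refl _)
    simpa using this
  have h2 : (List.range lst.length).foldl (pvStepApp pO) (lst ++ lst.filter pE)
      = lst ++ (lst.filter pE ++ lst.filter pO) := by
    have := pv_loop_app pO lst (lst.filter pE) lst.length (le_refl _)
    rw [List.take_length] at this
    rw [this, List.append_assoc]
  have hlen : (lst.filter pE ++ lst.filter pO).length = lst.length := by
    rw [List.length_append]
    have := pv_filter_len pE lst
    have hpo : pO = fun x => !pE x := by rfl
    rw [hpo]
    omega
  have h3 := pv_loop_pop lst (lst.filter pE ++ lst.filter pO) hlen lst.length (le_refl _)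
  rw [h1, h2, h3]
  have hf2 : (lst.filter pO).length + (lst.filter pE).length ≤ lst.length := by
    have h := pv_filter_len pE lst
    have hpo : pO = fun x => !pE x := by rfl
    rw [hpo]; omega
  simp [List.reverse_append, hf2]
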